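-- pv_equiv track=rewrite | github.com/softly-undefined/language-learning-llms | data-collection/sample.py | group_entries_by_level
-- ===== SOURCE A (Python) =====
-- from typing import Any
--
-- CEFR_LEVELS = ("A1", "A2", "B1", "B2", "C1", "C2")
--
-- def group_entries_by_level(
--     entries: list[dict[str, Any]],
-- ) -> dict[str, list[dict[str, Any]]]:
--     grouped = {level: [] for level in CEFR_LEVELS}
--
--     for entry in entries:
--         level = entry.get("cefr_level")
--         if level in grouped:
--             grouped[level].append(entry)
--
--     return grouped
-- ===== SOURCE B (Python) =====
-- CEFR_LEVELS = ("A1", "A2", "B1", "B2", "C1", "C2")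
--
-- def group_entries_by_level(entries):
--     return {
--         level: [e for e in entries if e.get("cefr_level") == level]
--         for level in CEFR_LEVELS
--     }
-- ===== Notes on version B (the rewrite author's own statement) =====
-- stated objective: simpler
-- what changed: Inverted the loop nesting: instead of one pass appending each entry to its pre-built bucket dict, B builds the dict by iterating over the six fixed CEFR levels and filtering the entries for each level.
import Mathlib
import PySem

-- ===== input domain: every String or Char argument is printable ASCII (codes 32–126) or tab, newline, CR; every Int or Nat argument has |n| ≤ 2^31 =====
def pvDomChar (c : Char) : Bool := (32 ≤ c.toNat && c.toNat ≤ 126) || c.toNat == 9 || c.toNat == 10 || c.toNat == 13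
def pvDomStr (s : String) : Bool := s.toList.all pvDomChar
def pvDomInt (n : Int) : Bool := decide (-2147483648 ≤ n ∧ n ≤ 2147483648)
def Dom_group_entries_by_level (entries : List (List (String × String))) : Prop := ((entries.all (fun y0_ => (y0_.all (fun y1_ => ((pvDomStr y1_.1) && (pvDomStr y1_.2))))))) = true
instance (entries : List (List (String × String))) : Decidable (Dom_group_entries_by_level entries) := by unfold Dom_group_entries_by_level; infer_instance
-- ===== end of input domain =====

-- B inverts the loop nesting (per-level filter over the entries instead of one pass appending
-- into buckets); same cost, simpler; the return values are proved equal on all inputs.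

-- ===== PORT A =====
-- CEFR_LEVELS tuple
def pvLevels : List String := ["A1", "A2", "B1", "B2", "C1", "C2"]

-- entry.get("cefr_level")  (dict → association list; first-match lookup)
def pvGetLevel (e : List (String × String)) : Option String :=
  (PySem.Dict.mk e).get? "cefr_level"

def group_entries_by_level (entries : List (List (String × String))) : List (String × List (List (String × String))) :=
  -- grouped = {level: [] for level in CEFR_LEVELS}
  let grouped0 : PySem.Dict String (List (List (String × String))) :=
    pvLevels.foldl (fun d l => d.insert l []) PySem.Dict.empty
  -- for entry in entries: level = entry.get("cefr_level"); if level in grouped: grouped[level].append(entry)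
  let grouped :=
    entries.foldl (fun g e =>
      match pvGetLevel e with
      | some l => if g.contains l then g.modify l [] (· ++ [e]) else g
      | none => g) grouped0
  grouped.items

-- ===== PORT B =====
-- {level: [e for e in entries if e.get("cefr_level") == level] for level in CEFR_LEVELS}
-- (the six keys are distinct literals, so the dict comprehension's items are this map)
def group_entries_by_level_alt (entries : List (List (String × String))) : List (String × List (List (String × String))) :=
  pvLevels.map (fun level => (level, entries.filter (fun e => pvGetLevel e == some level)))

-- ===== PRECONDITION & SPEC =====
def Spec_group_entries_by_level (entries : List (List (String × String))) (out : List (String × List (List (String × String)))) : Prop := out = group_entries_by_level_alt entries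
instance (entries : List (List (String × String))) (out : List (String × List (List (String × String)))) : Decidable (Spec_group_entries_by_level entries out) := by unfold Spec_group_entries_by_level; infer_instance

-- ===== CLAIM (what is proved, stated in full; the proofs are below) =====
def Claim_equal_group_entries_by_level : Prop := ∀ (entries : List (List (String × String))), Dom_group_entries_by_level entries → Spec_group_entries_by_level entries (group_entries_by_level entries)

-- ===== LEMMAS AND PROOFS =====

-- abbreviation for A's loop body (proof-side only)
def pvStep (g : PySem.Dict String (List (List (String × String)))) (e : List (String × String)) : PySem.Dict String (List (List (String × String))) :=
  match pvGetLevel e with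
  | some l => if g.contains l then g.modify l [] (· ++ [e]) else g
  | none => g

-- the loop never changes the key list
theorem pvStep_keys (entries : List (List (String × String))) (g : PySem.Dict String (List (List (String × String)))) :
    (entries.foldl pvStep g).keys = g.keys := by
  induction entries generalizing g with
  | nil => rfl
  | cons e rest ih =>
    rw [List.foldl_cons, ih]
    unfold pvStep
    cases pvGetLevel e with
    | none => rfl
    | some l =>
      dsimp only
      by_cases h : g.contains l = true
      · rw [if_pos h, PySem.Dict.keys_modify, PySem.Dict.keys_insert_of_contains _ _ h]
      · rw [if_neg h]

-- per-key contents of the loop = the filter, as long as the keys are exactly pvLevels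
theorem pvLoop_getD (entries : List (List (String × String))) (g : PySem.Dict String (List (List (String × String))))
    (hk : g.keys = pvLevels) (c : String) (hc : c ∈ pvLevels) :
    (entries.foldl pvStep g).getD c [] =
      g.getD c [] ++ entries.filter (fun e => pvGetLevel e == some c) := by
  induction entries generalizing g with
  | nil => simp
  | cons e rest ih =>
    rw [List.foldl_cons, List.filter_cons]
    have hstep : List.foldl pvStep (pvStep g e) rest = List.foldl pvStep (match pvGetLevel e with
      | some l => if g.contains l then g.modify l [] (· ++ [e]) else g
      | none => g) rest := rfl
    rw [hstep]
    cases hle : pvGetLevel e with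
    | none =>
      dsimp only
      rw [ih g hk]
      simp
    | some l =>
      dsimp only
      by_cases hcon : g.contains l = true
      · rw [if_pos hcon]
        have hk' : (g.modify l [] (· ++ [e])).keys = pvLevels := by
          rw [PySem.Dict.keys_modify, PySem.Dict.keys_insert_of_contains _ _ hcon, hk]
        rw [ih _ hk', PySem.Dict.getD_modify]
        by_cases hcl : c = l
        · subst hcl
          simp
        · simp [hcl, Ne.symm hcl]
      · rw [if_neg hcon, ih g hk]
        have hlc : l ≠ c := by
          intro hlc; subst hlc
          rw [PySem.Dict.contains_iff_mem_keys] at hcon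
          exact hcon (hk ▸ hc)
        simp [hlc]

theorem group_entries_by_level_eq (entries : List (List (String × String))) :
    group_entries_by_level entries = group_entries_by_level_alt entries := by
  have hA : group_entries_by_level entries =
      (entries.foldl pvStep (PySem.Dict.mk ([("A1", []), ("A2", []), ("B1", []), ("B2", []), ("C1", []), ("C2", [])] : List (String × List (List (String × String)))))).items := rfl
  rw [hA]
  set g0 : PySem.Dict String (List (List (String × String))) :=
    PySem.Dict.mk [("A1", []), ("A2", []), ("B1", []), ("B2", []), ("C1", []), ("C2", [])] with hg0def
  have hkeys : (entries.foldl pvStep g0).keys = pvLevels := by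
    rw [pvStep_keys]; decide
  have hnodup : (entries.foldl pvStep g0).keys.Nodup := by rw [hkeys]; decide
  rw [PySem.Dict.items_eq_map_keys _ hnodup [], hkeys]
  unfold group_entries_by_level_alt
  apply List.map_congr_left
  intro c hc
  rw [pvLoop_getD entries g0 (by decide) c hc]
  have hz : g0.getD c [] = [] := by
    fin_cases hc <;> decide
  rw [hz, List.nil_append]

-- ===== VERDICT (by name: the statement is the Claim_ definition above) =====
theorem group_entries_by_level_spec : Claim_equal_group_entries_by_level := by
  intro entries _
  exact group_entries_by_level_eq entries
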